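-- pv_equiv track=rewrite | github.com/SaicoBys/Python-Studie | challenges/code500/11-20_strings.py | sum_positives_reverse_list
-- ===== SOURCE A (Python) =====
-- def sum_positives_reverse_list(lst):
--     reversed_list = []
--     nums = 0
--     for index in range(len(lst) - 1, -1, -1):
--         reversed_list.append(lst[index])
--         if lst[index] > 0:
--             nums += lst[index]
--
--     message = f"The total is: {nums} and the order is: {reversed_list}"
--     return message
-- ===== SOURCE B (Python) =====
-- def sum_positives_reverse_list(lst):
--     reversed_list = lst[::-1]
--     nums = sum(x for x in lst if x > 0)
--     return f"The total is: {nums} and the order is: {reversed_list}"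
-- ===== Notes on version B (the rewrite author's own statement) =====
-- stated objective: simpler
-- what changed: Replaces A's single fused backward index loop (appending and conditionally summing in one pass) with a direct slice reversal lst[::-1] plus a separate generator-expression sum over the original list.
import Mathlib
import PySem

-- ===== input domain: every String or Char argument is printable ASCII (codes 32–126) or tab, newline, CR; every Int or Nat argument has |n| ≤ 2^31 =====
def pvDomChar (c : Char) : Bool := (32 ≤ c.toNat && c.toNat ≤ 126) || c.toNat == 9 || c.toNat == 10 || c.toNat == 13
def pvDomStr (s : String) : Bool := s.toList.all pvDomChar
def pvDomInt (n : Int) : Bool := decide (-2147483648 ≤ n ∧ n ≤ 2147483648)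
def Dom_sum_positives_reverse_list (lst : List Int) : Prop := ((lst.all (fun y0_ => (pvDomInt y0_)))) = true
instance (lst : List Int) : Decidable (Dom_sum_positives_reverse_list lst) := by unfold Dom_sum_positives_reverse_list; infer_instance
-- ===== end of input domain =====

-- B replaces A's single fused backward index loop with a slice reversal plus a separate sum over the positives (objective: simpler).


-- Python's repr of a list of ints, as used by the f-string: "[a, b, c]" (exact for int lists)
def pyIntListRepr (xs : List Int) : String :=
  "[" ++ PySem.Str.join ", " (xs.map PySem.Int.toStr) ++ "]"

-- ===== PORT A =====
def sum_positives_reverse_list (lst : List Int) : String :=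
  let st := (PySem.List.pyRange (PySem.List.len lst - 1) (-1) (-1)).foldl
    (fun (acc : List Int × Int) index =>
      (acc.1 ++ [PySem.List.pyGetD lst index 0],
       if PySem.List.pyGetD lst index 0 > 0 then acc.2 + PySem.List.pyGetD lst index 0 else acc.2))
    ([], 0)
  "The total is: " ++ PySem.Int.toStr st.2 ++ " and the order is: " ++ pyIntListRepr st.1

-- ===== PORT B =====
def sum_positives_reverse_list_alt (lst : List Int) : String :=
  let reversed_list := (PySem.List.slice? lst none none (-1)).getD []
  let nums := (lst.filter (fun x => x > 0)).sum
  "The total is: " ++ PySem.Int.toStr nums ++ " and the order is: " ++ pyIntListRepr reversed_list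

-- ===== PRECONDITION & SPEC =====
def Spec_sum_positives_reverse_list (lst : List Int) (out : String) : Prop := out = sum_positives_reverse_list_alt lst
instance (lst : List Int) (out : String) : Decidable (Spec_sum_positives_reverse_list lst out) := by unfold Spec_sum_positives_reverse_list; infer_instance

-- ===== CLAIM (what is proved, stated in full; the proofs are below) =====
def Claim_equal_sum_positives_reverse_list : Prop := ∀ (lst : List Int), Dom_sum_positives_reverse_list lst → Spec_sum_positives_reverse_list lst (sum_positives_reverse_list lst)

-- ===== LEMMAS AND PROOFS =====

-- A's loop over range(len(lst)-1, -1, -1), on any suffix of indices, appends the reverse and adds the positive sum.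
theorem pvLoopA (lst : List Int) (acc : List Int × Int) :
    (PySem.List.pyRange (PySem.List.len lst - 1) (-1) (-1)).foldl
      (fun (acc : List Int × Int) index =>
        (acc.1 ++ [PySem.List.pyGetD lst index 0],
         if PySem.List.pyGetD lst index 0 > 0 then acc.2 + PySem.List.pyGetD lst index 0 else acc.2))
      acc
    = (acc.1 ++ lst.reverse, acc.2 + (lst.filter (fun x => x > 0)).sum) := by
  induction lst using List.reverseRecOn generalizing acc with
  | nil =>
      simp
  | append_singleton xs x ih =>
      have hlen : PySem.List.len (xs ++ [x]) - 1 = (xs.length : Int) := by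
        simp [PySem.List.len]
      rw [hlen, PySem.List.pyRange_neg_one_cons (by omega), List.foldl_cons]
      have hx : PySem.List.pyGetD (xs ++ [x]) (xs.length : Int) 0 = x := by
        rw [PySem.List.pyGetD_of_nonneg _ _ (by omega)]
        simp [List.getD]
      have hrange : ∀ i ∈ PySem.List.pyRange ((xs.length : Int) - 1) (-1) (-1),
          PySem.List.pyGetD (xs ++ [x]) i 0 = PySem.List.pyGetD xs i 0 := by
        intro i hi
        rw [PySem.List.mem_pyRange_neg_one] at hi
        rw [PySem.List.pyGetD_of_nonneg _ _ (by omega),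
            PySem.List.pyGetD_of_nonneg _ _ (by omega)]
        have hi' : i.toNat < xs.length := by omega
        simp [List.getD, List.getElem?_append_left hi']
      have hstep :
          (PySem.List.pyRange ((xs.length : Int) - 1) (-1) (-1)).foldl
            (fun (acc : List Int × Int) index =>
              (acc.1 ++ [PySem.List.pyGetD (xs ++ [x]) index 0],
               if PySem.List.pyGetD (xs ++ [x]) index 0 > 0 then
                 acc.2 + PySem.List.pyGetD (xs ++ [x]) index 0 else acc.2))
            (acc.1 ++ [PySem.List.pyGetD (xs ++ [x]) (xs.length : Int) 0],
             if PySem.List.pyGetD (xs ++ [x]) (xs.length : Int) 0 > 0 then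
               acc.2 + PySem.List.pyGetD (xs ++ [x]) (xs.length : Int) 0 else acc.2)
          = (PySem.List.pyRange ((xs.length : Int) - 1) (-1) (-1)).foldl
            (fun (acc : List Int × Int) index =>
              (acc.1 ++ [PySem.List.pyGetD xs index 0],
               if PySem.List.pyGetD xs index 0 > 0 then
                 acc.2 + PySem.List.pyGetD xs index 0 else acc.2))
            (acc.1 ++ [x], if x > 0 then acc.2 + x else acc.2) := by
        rw [hx]
        exact PySem.List.foldl_congr_mem _ _ _ _ (fun b a ha => by rw [hrange a ha])
      have hlenxs : PySem.List.len xs - 1 = (xs.length : Int) - 1 := by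
        simp [PySem.List.len]
      rw [hstep]
      rw [← hlenxs, ih]
      by_cases hpos : x > 0
      · simp [hpos, List.filter_append]; ring
      · simp [hpos, List.filter_append]

-- ===== VERDICT (by name: the statement is the Claim_ definition above) =====
theorem sum_positives_reverse_list_spec : Claim_equal_sum_positives_reverse_list := by
  intro lst _
  unfold Spec_sum_positives_reverse_list sum_positives_reverse_list sum_positives_reverse_list_alt
  rw [pvLoopA]
  simp [PySem.List.slice?_none_none_neg_one]
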